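-- pv_equiv track=rewrite | github.com/mahbubul-haq/RIDER-Ride-Sharing-and-Car-Rental-Service | uber/Functions.py | isValid_mobileNumber
-- ===== SOURCE A (Python) =====
-- def isValid_mobileNumber(numberString):
--
--     '''
--
--     :param numberString: mobile number as string
--     :return: True or False
--     '''
--
--     if len(numberString) != 11:
--         return False
--     elif numberString[0] != '0' or numberString[1] != '1':
--         return False
--     else:
--         for i in range(2, 11):
--             if not (numberString[i] >= '0' and numberString[i] <= '9'):
--                 return False
--
--         return True
-- ===== SOURCE B (Python) =====
-- import re
--
-- def isValid_mobileNumber(numberString):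
--     '''
--     :param numberString: mobile number as string
--     :return: True or False
--     '''
--     return bool(re.fullmatch(r'01\d{9}', numberString, re.ASCII))
-- ===== Notes on version B (the rewrite author's own statement) =====
-- stated objective: idiomatic
-- what changed: Replaces the length check, two prefix comparisons and the explicit index loop with a single anchored ASCII regular-expression full match r'01\d{9}'.
import Mathlib
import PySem

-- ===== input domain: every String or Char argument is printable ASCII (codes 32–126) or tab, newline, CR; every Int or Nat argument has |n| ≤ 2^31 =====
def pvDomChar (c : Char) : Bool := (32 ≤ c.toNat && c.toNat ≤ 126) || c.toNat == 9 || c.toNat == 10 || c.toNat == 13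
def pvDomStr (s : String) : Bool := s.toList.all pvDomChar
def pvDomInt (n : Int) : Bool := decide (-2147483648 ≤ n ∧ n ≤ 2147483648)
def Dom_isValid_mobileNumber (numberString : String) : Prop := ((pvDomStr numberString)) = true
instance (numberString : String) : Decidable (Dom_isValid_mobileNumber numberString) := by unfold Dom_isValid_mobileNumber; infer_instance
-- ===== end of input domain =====

-- B replaces A's length check, prefix comparisons and index loop with a single anchored regex full match r'01\d{9}' (re.ASCII); same return value, idiomatic rewrite.
-- ===== PORT A =====
def isValid_mobileNumber (numberString : String) : Bool :=
  if PySem.Str.len numberString ≠ 11 then false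
  else if PySem.Str.pyGet? numberString 0 ≠ some '0' || PySem.Str.pyGet? numberString 1 ≠ some '1' then false
  else
    -- the early-return loop over range(2, 11); the 'none' branch is unreachable since len = 11
    (PySem.List.pyRange 2 11 1).all fun i =>
      match PySem.Str.pyGet? numberString i with
      | some c => decide ('0' ≤ c) && decide (c ≤ '9')
      | none => false

-- ===== PORT B =====
-- B is re.fullmatch(r'01\d{9}', s, re.ASCII): the literal '01' prefix is the pattern match,
-- \d{9} is 'nine more chars, each an ASCII digit' (re.ASCII makes \d exactly [0-9])
def isValid_mobileNumber_alt (numberString : String) : Bool :=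
  match numberString.toList with
  | a :: b :: rest =>
      a == '0' && b == '1' && rest.length == 9 && rest.all fun c => decide ('0' ≤ c) && decide (c ≤ '9')
  | _ => false

-- ===== PRECONDITION & SPEC =====
def Spec_isValid_mobileNumber (numberString : String) (out : Bool) : Prop := out = isValid_mobileNumber_alt numberString
instance (numberString : String) (out : Bool) : Decidable (Spec_isValid_mobileNumber numberString out) := by unfold Spec_isValid_mobileNumber; infer_instance

-- ===== CLAIM (what is proved, stated in full; the proofs are below) =====
def Claim_equal_isValid_mobileNumber : Prop := ∀ (numberString : String), Dom_isValid_mobileNumber numberString → Spec_isValid_mobileNumber numberString (isValid_mobileNumber numberString)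

-- ===== LEMMAS AND PROOFS =====

-- ===== VERDICT (by name: the statement is the Claim_ definition above) =====
set_option maxHeartbeats 1600000 in
lemma ports_agree (numberString : String) :
    isValid_mobileNumber numberString = isValid_mobileNumber_alt numberString := by
  unfold isValid_mobileNumber isValid_mobileNumber_alt
  have hr : PySem.List.pyRange 2 11 1 = [2,3,4,5,6,7,8,9,10] := by decide
  rcases h : numberString.toList with _ | ⟨c0, _ | ⟨c1, _ | ⟨c2, _ | ⟨c3, _ | ⟨c4, _ | ⟨c5, _ | ⟨c6, _ | ⟨c7, _ | ⟨c8, _ | ⟨c9, _ | ⟨c10, _ | ⟨c11, t⟩⟩⟩⟩⟩⟩⟩⟩⟩⟩⟩⟩ <;>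
    simp [pysem, h, hr, PySem.Str.pyGet?, PySem.List.pyGet?, PySem.List.pyIdx?] <;>
    first
      | (simp only [Bool.beq_eq_decide_eq]; try ac_rfl)
      | (intro h12; omega)

theorem isValid_mobileNumber_spec : Claim_equal_isValid_mobileNumber := by
  intro s _
  unfold Spec_isValid_mobileNumber
  exact ports_agree s
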